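-- pv_equiv track=rewrite | github.com/gh0stintheshe11/LeetCode-Solutions | solutions/1943.count-pairs-of-equal-substrings-with-minimum-difference/Python3.py | countQuadruples
-- ===== SOURCE A (Python) =====
-- def countQuadruples(firstString: str, secondString: str) -> int:
--     from collections import defaultdict
--
--     first_occurrence = {}
--     last_occurrence = {}
--
--     for i, char in enumerate(firstString):
--         if char not in first_occurrence:
--             first_occurrence[char] = i
--
--     for i, char in enumerate(secondString):
--         last_occurrence[char] = i
--
--     min_diff = float('inf')
--     count = 0
--
--     for char in first_occurrence:
--         if char in last_occurrence:
--             i = first_occurrence[char]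
--             b = last_occurrence[char]
--             current_diff = i - b
--             if current_diff < min_diff:
--                 min_diff = current_diff
--                 count = 1
--             elif current_diff == min_diff:
--                 count += 1
--
--     return count
-- ===== SOURCE B (Python) =====
-- def countQuadruples(firstString: str, secondString: str) -> int:
--     # no occurrence dicts: per distinct char, first occurrence via str.find on
--     # firstString and last occurrence via find on the reversed secondString;
--     # then sort the differences and count the leading run of equal minima.
--     rev = secondString[::-1]
--     n = len(secondString)
--     diffs = []
--     for c in dict.fromkeys(firstString):
--         j = rev.find(c)
--         if j != -1:
--             diffs.append(firstString.find(c) - (n - 1 - j))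
--     diffs.sort()
--     run = 0
--     if diffs:
--         m = diffs[0]
--         for d in diffs:
--             if d != m:
--                 break
--             run += 1
--     return run
-- ===== Notes on version B (the rewrite author's own statement) =====
-- stated objective: alternative
-- what changed: B drops both occurrence dicts and the fused online min/count state machine: per distinct character it locates the first occurrence with str.find on firstString and the last occurrence with find on the reversed secondString, then sorts the differences and counts the leading run of the sorted list.
import Mathlib
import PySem

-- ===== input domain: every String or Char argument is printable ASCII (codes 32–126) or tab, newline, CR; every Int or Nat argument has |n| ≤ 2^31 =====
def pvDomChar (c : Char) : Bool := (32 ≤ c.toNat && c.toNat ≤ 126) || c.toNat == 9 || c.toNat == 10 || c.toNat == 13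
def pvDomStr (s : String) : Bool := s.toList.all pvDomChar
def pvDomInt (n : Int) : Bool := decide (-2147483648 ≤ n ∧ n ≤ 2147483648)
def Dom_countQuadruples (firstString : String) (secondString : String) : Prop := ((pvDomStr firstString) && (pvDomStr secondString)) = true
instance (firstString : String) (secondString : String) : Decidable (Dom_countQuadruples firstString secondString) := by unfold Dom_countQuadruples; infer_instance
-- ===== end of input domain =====

-- B drops the occurrence dicts and the fused online min/count state machine: it locates
-- occurrences per distinct character with find on firstString and on the reversed
-- secondString, sorts the differences and counts the leading run (alternative algorithm).

-- ===== PORT A =====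
-- first loop: 'if char not in first_occurrence: first_occurrence[char] = i'
def pvFirstOcc (s : String) : PySem.Dict Char Int :=
  (PySem.List.enumerate s.toList).foldl
    (fun d p => if d.contains p.2 then d else d.insert p.2 p.1) PySem.Dict.empty

-- second loop: 'last_occurrence[char] = i'
def pvLastOcc (s : String) : PySem.Dict Char Int :=
  (PySem.List.enumerate s.toList).foldl (fun d p => d.insert p.2 p.1) PySem.Dict.empty

-- A's loop body on the state (min_diff, count); 'none' models the initial float('inf')
def pvStep (st : Option Int × Int) (d : Int) : Option Int × Int :=
  match st.1 with
  | none => (some d, 1)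
  | some m => if d < m then (some d, 1) else if d = m then (some m, st.2 + 1) else st

def countQuadruples (firstString : String) (secondString : String) : Int :=
  ((pvFirstOcc firstString).keys.foldl
    (fun st c =>
      if (pvLastOcc secondString).contains c then
        pvStep st ((pvFirstOcc firstString).getD c 0 - (pvLastOcc secondString).getD c 0)
      else st)
    ((none : Option Int), (0 : Int))).2

-- ===== PORT B =====
-- 'run = 0; for d in diffs: if d != m: break; run += 1'
def pvRun (m : Int) : List Int → Int
  | [] => 0
  | d :: t => if d ≠ m then 0 else 1 + pvRun m t

def countQuadruples_alt (firstString : String) (secondString : String) : Int :=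
  -- rev = secondString[::-1]; the step -1 slice never raises (slice?_none_none_neg_one)
  let rev : List Char := (PySem.List.slice? secondString.toList none none (-1)).getD []
  let n : Int := PySem.Str.len secondString
  -- for c in dict.fromkeys(firstString): j = rev.find(c); if j != -1: diffs.append(...)
  let diffs : List Int :=
    (PySem.List.dedup firstString.toList).filterMap (fun c =>
      let j := PySem.Chars.find rev [c]
      if j ≠ -1 then some (PySem.Chars.find firstString.toList [c] - (n - 1 - j)) else none)
  -- diffs.sort()
  let ds := PySem.List.sorted diffs (fun x => x) false
  -- 'run = 0; if diffs: m = diffs[0]; for d in diffs: …'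
  match ds with
  | [] => 0
  | m :: _ => pvRun m ds

-- ===== PRECONDITION & SPEC =====
def Spec_countQuadruples (firstString : String) (secondString : String) (out : Int) : Prop := out = countQuadruples_alt firstString secondString
instance (firstString : String) (secondString : String) (out : Int) : Decidable (Spec_countQuadruples firstString secondString out) := by unfold Spec_countQuadruples; infer_instance

-- ===== CLAIM (what is proved, stated in full; the proofs are below) =====
def Claim_equal_countQuadruples : Prop := ∀ (firstString : String) (secondString : String), Dom_countQuadruples firstString secondString → Spec_countQuadruples firstString secondString (countQuadruples firstString secondString)

-- ===== LEMMAS AND PROOFS =====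

-- the value A's fold computes over a list of differences: running minimum, count of minimum
def pvSpecFold : List Int → Option Int × Int
  | [] => (none, 0)
  | d :: t => (some (t.foldl min d), ((d :: t).count (t.foldl min d) : Int))

theorem pv_step_snoc (d0 : Int) (t : List Int) (d : Int) :
    pvStep (pvSpecFold (d0 :: t)) d = pvSpecFold (d0 :: (t ++ [d])) := by
  have hfold : (t ++ [d]).foldl min d0 = min (t.foldl min d0) d := by
    rw [List.foldl_append]; rfl
  have hsnoc : d0 :: (t ++ [d]) = (d0 :: t) ++ [d] := by simp
  have hle : ∀ x ∈ d0 :: t, t.foldl min d0 ≤ x := by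
    intro x hx
    rcases List.mem_cons.mp hx with h | h
    · subst h; exact (PySem.List.foldl_min_le t x).1
    · exact (PySem.List.foldl_min_le t d0).2 x h
  simp only [pvSpecFold, pvStep, hfold, hsnoc]
  by_cases hlt : d < t.foldl min d0
  · have hcnt : (d0 :: t).count d = 0 :=
      List.count_eq_zero.mpr (fun hd => absurd (hle d hd) (by omega))
    rw [if_pos hlt, min_eq_right hlt.le, List.count_append, hcnt]
    simp
  · by_cases heq : d = t.foldl min d0
    · rw [if_neg hlt, if_pos heq, heq, min_self, List.count_append]
      simp
    · have hgt : t.foldl min d0 < d := by omega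
      rw [if_neg hlt, if_neg heq, min_eq_left hgt.le, List.count_append]
      simp [List.count_cons, heq]

theorem pv_foldl_pvStep (ds : List Int) :
    ds.foldl pvStep ((none : Option Int), (0 : Int)) = pvSpecFold ds := by
  induction ds using List.reverseRecOn with
  | nil => rfl
  | append_singleton ds d ih =>
    rw [List.foldl_append, ih]
    cases ds with
    | nil => simp [pvSpecFold, pvStep]
    | cons d0 t => simpa using pv_step_snoc d0 t d

-- A's diff list, read off the third loop
def pvDiffsA (f s : String) : List Int :=
  (pvFirstOcc f).keys.filterMap
    (fun c => if (pvLastOcc s).contains c then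
        some ((pvFirstOcc f).getD c 0 - (pvLastOcc s).getD c 0) else none)

theorem pv_filterMap_if (l : List Char) (p : Char → Bool) (g : Char → Int) :
    l.filterMap (fun c => if p c then some (g c) else none) = (l.filter p).map g := by
  induction l with
  | nil => rfl
  | cons c t ih =>
    by_cases h : p c <;> simp [h, ih]

theorem pv_A_eq_specFold (f s : String) :
    countQuadruples f s = (pvSpecFold (pvDiffsA f s)).2 := by
  unfold countQuadruples
  rw [PySem.List.foldl_if_eq_foldl_filter
      (fun c => (pvLastOcc s).contains c)
      (fun st c => pvStep st ((pvFirstOcc f).getD c 0 - (pvLastOcc s).getD c 0)),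
    ← List.foldl_map]
  unfold pvDiffsA
  rw [pv_filterMap_if, pv_foldl_pvStep]

-- generic versions of the two dict-building folds, over a plain char list
def pvFO (l : List Char) : PySem.Dict Char Int :=
  (PySem.List.enumerate l).foldl
    (fun d p => if d.contains p.2 then d else d.insert p.2 p.1) PySem.Dict.empty

def pvLO (l : List Char) : PySem.Dict Char Int :=
  (PySem.List.enumerate l).foldl (fun d p => d.insert p.2 p.1) PySem.Dict.empty

theorem pvFO_snoc (l : List Char) (x : Char) :
    pvFO (l ++ [x]) = if (pvFO l).contains x then pvFO l
                      else (pvFO l).insert x (l.length : Int) := by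
  unfold pvFO
  rw [PySem.List.enumerate_append, List.foldl_append]
  simp [PySem.List.enumerate]

theorem pvLO_snoc (l : List Char) (x : Char) :
    pvLO (l ++ [x]) = (pvLO l).insert x (l.length : Int) := by
  unfold pvLO
  rw [PySem.List.enumerate_append, List.foldl_append]
  simp [PySem.List.enumerate]

theorem pvFO_keys (l : List Char) : (pvFO l).keys = PySem.List.dedup l := by
  induction l using List.reverseRecOn with
  | nil => rfl
  | append_singleton l x ih =>
    rw [pvFO_snoc]
    have hc : (pvFO l).contains x = decide (x ∈ l) := by
      rw [PySem.Dict.contains_eq_decide_mem_keys, ih]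
      simp [PySem.List.mem_dedup]
    have hdd : PySem.List.dedup (l ++ [x])
        = if x ∈ l then PySem.List.dedup l else PySem.List.dedup l ++ [x] := by
      rw [PySem.List.dedup_eq_ofList, PySem.Set.ofList_eq_foldl, List.foldl_append]
      simp only [List.foldl_cons, List.foldl_nil]
      rw [← PySem.Set.ofList_eq_foldl]
      by_cases hx : x ∈ l
      · simp [PySem.Set.add, PySem.Set.contains_eq_decide, PySem.Set.mem_ofList, hx,
          PySem.List.dedup_eq_ofList]
      · simp [PySem.Set.add, PySem.Set.contains_eq_decide, PySem.Set.mem_ofList, hx,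
          PySem.List.dedup_eq_ofList]
    rw [hdd, hc]
    by_cases hx : x ∈ l
    · simp [hx, ih]
    · simp only [hx, decide_false, Bool.false_eq_true, if_false]
      rw [PySem.Dict.keys_insert_of_not_contains _ _ (by simp [hc, hx]), ih]

theorem pvFO_contains (l : List Char) (c : Char) :
    (pvFO l).contains c = true ↔ c ∈ l := by
  rw [PySem.Dict.contains_eq_decide_mem_keys, pvFO_keys]
  simp [PySem.List.mem_dedup]

theorem pvFO_getD (l : List Char) (c : Char) (h : c ∈ l) :
    (pvFO l).getD c 0 = (((PySem.List.index? l c).getD 0 : Nat) : Int) := by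
  induction l using List.reverseRecOn with
  | nil => simp at h
  | append_singleton l x ih =>
    rw [pvFO_snoc]
    by_cases hx : x ∈ l
    · have hcl : c ∈ l := by
        rcases List.mem_append.mp h with h' | h'
        · exact h'
        · simp at h'; exact h' ▸ hx
      rw [if_pos ((pvFO_contains l x).mpr hx), PySem.List.index?_append_of_mem _ hcl]
      exact ih hcl
    · rw [if_neg (by simp [pvFO_contains l x, hx])]
      by_cases hcx : c = x
      · subst hcx
        rw [PySem.Dict.getD_insert_self, PySem.List.index?_append_singleton_self l c hx]
        rfl
      · have hcl : c ∈ l := by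
          rcases List.mem_append.mp h with h' | h'
          · exact h'
          · simp at h'; exact absurd h' hcx
        rw [PySem.Dict.getD_insert_of_ne _ _ _ hcx, PySem.List.index?_append_of_mem _ hcl]
        exact ih hcl

theorem pvLO_keys (l : List Char) : (pvLO l).keys = PySem.Set.ofList l := by
  unfold pvLO
  rw [PySem.Dict.keys_foldl_insert_key (PySem.List.enumerate l) (fun p => p.2) (fun _ p => p.1)]
  rw [PySem.Dict.keys_empty, PySem.Set.update_nil_left, PySem.List.map_snd_enumerate]

theorem pvLO_contains (l : List Char) (c : Char) :
    (pvLO l).contains c = true ↔ c ∈ l := by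
  rw [PySem.Dict.contains_eq_decide_mem_keys, pvLO_keys]
  simp [PySem.Set.mem_ofList]

theorem pvLO_getD (l : List Char) (c : Char) (h : c ∈ l) :
    (pvLO l).getD c 0
      = (l.length : Int) - 1 - (((PySem.List.index? l.reverse c).getD 0 : Nat) : Int) := by
  induction l using List.reverseRecOn with
  | nil => simp at h
  | append_singleton l x ih =>
    rw [pvLO_snoc, List.reverse_append]
    simp only [List.reverse_cons, List.reverse_nil, List.nil_append, List.singleton_append]
    by_cases hcx : c = x
    · subst hcx
      rw [PySem.Dict.getD_insert_self, PySem.List.index?_cons_self]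
      simp
    · have hcl : c ∈ l := by
        rcases List.mem_append.mp h with h' | h'
        · exact h'
        · simp at h'; exact absurd h' hcx
      have hrev : c ∈ l.reverse := List.mem_reverse.mpr hcl
      obtain ⟨j, hj⟩ := Option.isSome_iff_exists.mp
        ((PySem.List.index?_isSome_iff l.reverse c).mpr hrev)
      rw [PySem.Dict.getD_insert_of_ne _ _ _ hcx,
        PySem.List.index?_cons_of_ne l.reverse (fun h' => hcx h'.symm), ih hcl, hj]
      simp
      push_cast
      ring

-- s.find(c) for a single character c is the index of c's first occurrence, or -1
theorem pv_singleton_prefix (c : Char) (xs : List Char) :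
    [c] <+: xs ↔ xs.head? = some c := by
  cases xs with
  | nil => simp
  | cons y t =>
    constructor
    · rintro ⟨r, hr⟩; cases hr; simp
    · intro h; simp at h; exact ⟨t, by simp [h]⟩

theorem pv_find_char (l : List Char) (c : Char) :
    PySem.Chars.find l [c]
      = match PySem.List.index? l c with
        | some k => (k : Int)
        | none => -1 := by
  have hpre : ∀ i : Nat, ([c] <+: l.drop i) ↔ l[i]? = some c := by
    intro i; rw [pv_singleton_prefix, List.head?_drop]
  cases hk : PySem.List.index? l c with
  | none =>
    have hcm : c ∉ l := (PySem.List.index?_eq_none_iff l c).mp hk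
    have hni : ¬ [c] <:+: l := by
      intro hinf
      obtain ⟨j, hj⟩ := (PySem.Chars.exists_prefix_drop_iff_isIn [c] l).mpr
        ((PySem.Chars.isIn_iff_infix [c] l).mpr hinf)
      exact hcm (List.mem_of_getElem? ((hpre j).mp hj))
    simpa using (PySem.Chars.find_eq_neg_one_iff l c.toString.toList).mpr (by simpa using hni)
  | some k =>
    obtain ⟨hklt, hget, hmin⟩ := PySem.List.getElem_of_index?_eq_some hk
    have hinf : [c] <:+: l := by
      rw [← PySem.Chars.isIn_iff_infix, ← PySem.Chars.exists_prefix_drop_iff_isIn]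
      exact ⟨k, (hpre k).mpr (by simp [hget, hklt])⟩
    have hnn : 0 ≤ PySem.Chars.find l [c] := (PySem.Chars.find_nonneg_iff l [c]).mpr hinf
    obtain ⟨hfp, hfmin⟩ := PySem.Chars.find_spec hnn
    have h1 : l[(PySem.Chars.find l [c]).toNat]? = some c := (hpre _).mp hfp
    have h1lt : (PySem.Chars.find l [c]).toNat < l.length := by
      by_contra hb
      rw [List.getElem?_eq_none (by omega)] at h1
      simp at h1
    have hle1 : k ≤ (PySem.Chars.find l [c]).toNat := by
      by_contra hb
      push_neg at hb
      exact hmin _ hb (by simpa [List.getElem?_eq_getElem h1lt] using h1)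
    have hle2 : (PySem.Chars.find l [c]).toNat ≤ k := by
      by_contra hb
      push_neg at hb
      exact hfmin k hb ((hpre k).mpr (by simp [hget, hklt]))
    simp only []
    omega

theorem pv_find_char_mem (l : List Char) (c : Char) (h : c ∈ l) :
    PySem.Chars.find l [c] = (((PySem.List.index? l c).getD 0 : Nat) : Int) := by
  rw [pv_find_char]
  cases hk : PySem.List.index? l c with
  | none => exact absurd h ((PySem.List.index?_eq_none_iff l c).mp hk)
  | some k => simp

theorem pv_find_char_eq_neg_one (l : List Char) (c : Char) :
    PySem.Chars.find l [c] = -1 ↔ c ∉ l := by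
  rw [pv_find_char]
  cases hk : PySem.List.index? l c with
  | none => simpa using PySem.List.index?_eq_none_iff l c |>.mp hk
  | some k =>
    have hc : c ∈ l := by
      by_contra hmem
      rw [(PySem.List.index?_eq_none_iff l c).mpr hmem] at hk
      simp at hk
    show (k : Int) = -1 ↔ c ∉ l
    constructor
    · intro h; exfalso; omega
    · intro h; exact absurd hc h

-- the two diff lists are the same list
theorem pv_diffs_eq (f s : String) :
    pvDiffsA f s
      = (PySem.List.dedup f.toList).filterMap (fun c =>
          let j := PySem.Chars.find ((PySem.List.slice? s.toList none none (-1)).getD []) [c]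
          if j ≠ -1 then
            some (PySem.Chars.find f.toList [c] - (PySem.Str.len s - 1 - j)) else none) := by
  have hFO : pvFirstOcc f = pvFO f.toList := rfl
  have hLO : pvLastOcc s = pvLO s.toList := rfl
  have hrev : (PySem.List.slice? s.toList none none (-1)).getD [] = s.toList.reverse := by
    rw [PySem.List.slice?_none_none_neg_one]; rfl
  unfold pvDiffsA
  rw [hFO, hLO, pvFO_keys]
  refine List.filterMap_congr ?_
  intro c hc
  have hcf : c ∈ f.toList := (PySem.List.mem_dedup f.toList c).mp hc
  simp only [hrev, PySem.Str.len_eq]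
  by_cases hcs : c ∈ s.toList
  · have hcrev : c ∈ s.toList.reverse := List.mem_reverse.mpr hcs
    have hcon : (pvLO s.toList).contains c = true := (pvLO_contains s.toList c).mpr hcs
    have hj : PySem.Chars.find s.toList.reverse [c] ≠ -1 := by
      intro h
      exact ((pv_find_char_eq_neg_one s.toList.reverse c).mp h) hcrev
    rw [hcon, if_pos rfl, if_pos hj]
    congr 1
    rw [pvFO_getD f.toList c hcf, pvLO_getD s.toList c hcs,
      pv_find_char_mem f.toList c hcf, pv_find_char_mem s.toList.reverse c hcrev]
  · have hcon : (pvLO s.toList).contains c = false := by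
      cases h : (pvLO s.toList).contains c
      · rfl
      · exact absurd ((pvLO_contains s.toList c).mp h) hcs
    have hj : PySem.Chars.find s.toList.reverse [c] = -1 :=
      (pv_find_char_eq_neg_one s.toList.reverse c).mpr
        (fun h => hcs (List.mem_reverse.mp h))
    rw [hcon, hj]
    simp

-- counting the leading run of the sorted list is counting the minimum
theorem pv_run_count (m : Int) (u : List Int)
    (hle : ∀ y ∈ u, m ≤ y) (hp : u.Pairwise (· ≤ ·)) :
    pvRun m u = (u.count m : Int) := by
  induction u with
  | nil => rfl
  | cons x r ih =>
    rcases List.pairwise_cons.mp hp with ⟨hx, hr⟩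
    by_cases hxm : x = m
    · subst hxm
      simp only [pvRun, List.count_cons]
      rw [ih (fun y hy => hle y (List.mem_cons_of_mem _ hy)) hr]
      simp
      omega
    · have hmx : m < x := lt_of_le_of_ne (hle x (List.mem_cons_self)) (fun h => hxm h.symm)
      have hcnt : r.count m = 0 :=
        List.count_eq_zero.mpr (fun hm => absurd (hx m hm) (by omega))
      simp [pvRun, hxm, List.count_cons, hcnt]

theorem pv_sorted_run (ds : List Int) :
    (pvSpecFold ds).2
      = match PySem.List.sorted ds (fun x => x) false with
        | [] => 0
        | m :: _ => pvRun m (PySem.List.sorted ds (fun x => x) false) := by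
  cases hs : PySem.List.sorted ds (fun x => x) false with
  | nil =>
    have : ds = [] := (PySem.List.sorted_eq_nil_iff ds (fun x => x) false).mp hs
    subst this
    rfl
  | cons m t =>
    cases ds with
    | nil =>
      exact absurd hs (by rw [(PySem.List.sorted_eq_nil_iff ([] : List Int) (fun x => x) false).mpr rfl]; simp)
    | cons d t0 =>
      have hperm : (m :: t).Perm (d :: t0) := hs ▸ PySem.List.sorted_perm (d :: t0) (fun x => x) false
      have hmem_m : m ∈ d :: t0 := hperm.mem_iff.mp List.mem_cons_self
      have hm_le : ∀ y ∈ d :: t0, m ≤ y := PySem.List.key_head_sorted_le (d :: t0) (fun x => x) hs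
      have hM_mem : t0.foldl min d ∈ d :: t0 := by
        rcases PySem.List.foldl_min_mem t0 d with h | h
        · rw [h]; exact List.mem_cons_self
        · exact List.mem_cons_of_mem _ h
      have hM_le : ∀ y ∈ d :: t0, t0.foldl min d ≤ y := by
        intro y hy
        rcases List.mem_cons.mp hy with h | h
        · subst h; exact (PySem.List.foldl_min_le t0 y).1
        · exact (PySem.List.foldl_min_le t0 d).2 y h
      have hMm : t0.foldl min d = m := le_antisymm (hM_le m hmem_m) (hm_le _ hM_mem)
      have hpair : (m :: t).Pairwise (· ≤ ·) := by
        have := PySem.List.sorted_pairwise (d :: t0) (fun x => x)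
        rw [hs] at this
        exact this
      have hle' : ∀ y ∈ m :: t, m ≤ y := fun y hy => hm_le y (hperm.mem_iff.mp hy)
      simp only [pvSpecFold]
      rw [pv_run_count m (m :: t) hle' hpair, hMm, hperm.count_eq]

-- ===== VERDICT (by name: the statement is the Claim_ definition above) =====
theorem countQuadruples_spec : Claim_equal_countQuadruples := by
  intro f s _
  unfold Spec_countQuadruples countQuadruples_alt
  rw [pv_A_eq_specFold, pv_diffs_eq, pv_sorted_run]
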